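-- pv_equiv track=rewrite | github.com/Chinglohsiu/BandControlNet | utils/model_utils.py | recover_position_track
-- ===== SOURCE A (Python) =====
-- def recover_position_track(merged_events_per_track):
--     # 对multiple_sequence的单个轨道而言
--     pos_index = [i for i, e in enumerate(merged_events_per_track) if 'Position_' in e] + [len(merged_events_per_track)]
--     recover_events_per_track = merged_events_per_track[:pos_index[0]]
--
--     for pos_st, pos_et in zip(pos_index[:-1], pos_index[1:]):
--         pos_events = merged_events_per_track[pos_st:pos_et]
--         pos_new_events = []
--         for event in pos_events:
--             if 'Position_' in event:
--                 current_position = event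
--             if 'Pitch_' not in event:
--                 pos_new_events.append(event)
--             else:
--                 if pos_new_events[-1] != current_position:
--                     pos_new_events.append(current_position)
--                     pos_new_events.append(event)
--                 else:
--                     pos_new_events.append(event)
--
--         recover_events_per_track += pos_new_events
--     return recover_events_per_track
-- ===== SOURCE B (Python) =====
-- def recover_position_track(merged_events_per_track):
--     # One flat pass: copy events verbatim until the first 'Position_' event,
--     # then track the current position and re-insert it before a 'Pitch_'
--     # event whenever it is not already the last emitted event.
--     out = []
--     current = None
--     for e in merged_events_per_track:
--         if current is None and 'Position_' not in e:
--             out.append(e)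
--             continue
--         if 'Position_' in e:
--             current = e
--         if 'Pitch_' not in e:
--             out.append(e)
--         elif out and out[-1] == current:
--             out.append(e)
--         else:
--             out.append(current)
--             out.append(e)
--     return out
-- ===== Notes on version B (the rewrite author's own statement) =====
-- stated objective: simpler
-- what changed: B drops A's pos_index build and per-segment slicing entirely and does one flat pass that copies events until the first 'Position_' event and then tracks the current position, re-inserting it before a 'Pitch_' event only when it is not the last emitted event.
import Mathlib
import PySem

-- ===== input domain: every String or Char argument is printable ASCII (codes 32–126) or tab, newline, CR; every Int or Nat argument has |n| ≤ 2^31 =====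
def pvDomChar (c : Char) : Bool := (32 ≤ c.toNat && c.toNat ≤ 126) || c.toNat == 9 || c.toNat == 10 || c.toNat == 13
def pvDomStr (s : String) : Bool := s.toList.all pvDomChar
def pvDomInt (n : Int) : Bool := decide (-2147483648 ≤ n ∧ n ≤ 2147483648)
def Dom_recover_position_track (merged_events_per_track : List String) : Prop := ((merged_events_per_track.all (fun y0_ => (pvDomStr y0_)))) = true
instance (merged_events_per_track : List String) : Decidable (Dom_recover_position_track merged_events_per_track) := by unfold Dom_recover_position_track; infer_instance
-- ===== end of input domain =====

-- B replaces A's position-index build and per-segment slicing by one flat pass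
-- that tracks the current position and the output list (objective: simpler).

-- 'Position_' in e  /  'Pitch_' in e  (shared substring tests, used by both ports)
def rptPos (e : String) : Bool := PySem.Str.isIn "Position_" e
def rptPit (e : String) : Bool := PySem.Str.isIn "Pitch_" e

-- ===== PORT A =====
-- A's inner per-event step: updates current_position, appends to pos_new_events.
-- pos_new_events[-1] on an empty list is an IndexError in Python (excluded by Pre_);
-- the unreachable fallback arm appends just the event.
def rptStep (st : List String × Option String) (event : String) : List String × Option String :=
  let cur := if rptPos event then some event else st.2
  if rptPit event = false then (st.1 ++ [event], cur)
  else
    match st.1.getLast?, cur with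
    | some last, some c =>
        if last ≠ c then (st.1 ++ [c, event], cur) else (st.1 ++ [event], cur)
    | _, _ => (st.1 ++ [event], cur)

-- the body of A's outer loop over one (pos_st, pos_et) pair
def rptSegFold (xs : List String) (st : List String × Option String) (pr : Int × Int) :
    List String × Option String :=
  let pos_events := PySem.List.slice xs (some pr.1) (some pr.2)
  let inner := pos_events.foldl rptStep ([], st.2)
  (st.1 ++ inner.1, inner.2)

-- pos_index = [i for i, e in enumerate(...) if 'Position_' in e] + [len(...)]
def rptPosIndex (xs : List String) : List Int :=
  ((PySem.List.enumerate xs 0).filter (fun p => rptPos p.2)).map (·.1) ++ [(xs.length : Int)]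

def recover_position_track (merged_events_per_track : List String) : List String :=
  (((rptPosIndex merged_events_per_track).dropLast.zip
        (rptPosIndex merged_events_per_track).tail).foldl
      (rptSegFold merged_events_per_track)
      (PySem.List.slice merged_events_per_track none
        (some ((rptPosIndex merged_events_per_track).headD 0)), none)).1

-- ===== PORT B =====
-- B's single per-event step (current is None until the first Position_ event)
def rptBStep (st : List String × Option String) (e : String) : List String × Option String :=
  if st.2 = none ∧ rptPos e = false then (st.1 ++ [e], st.2)
  else
    let cur := if rptPos e then some e else st.2
    if rptPit e = false then (st.1 ++ [e], cur)
    else if st.1 ≠ [] ∧ st.1.getLast? = cur then (st.1 ++ [e], cur)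
    else (st.1 ++ cur.toList ++ [e], cur)

def recover_position_track_alt (merged_events_per_track : List String) : List String :=
  (merged_events_per_track.foldl rptBStep ([], none)).1

-- ===== PRECONDITION & SPEC =====
-- Pre_ excludes exactly the inputs on which A raises IndexError: an event containing
-- both 'Position_' and 'Pitch_' starts its own segment with pos_new_events empty,
-- so A evaluates pos_new_events[-1] on an empty list.
def Pre_recover_position_track (merged_events_per_track : List String) : Prop :=
  (merged_events_per_track.all (fun e => !(rptPos e && rptPit e))) = true
instance (merged_events_per_track : List String) : Decidable (Pre_recover_position_track merged_events_per_track) := by unfold Pre_recover_position_track; infer_instance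

def pvWitness_recover_position_track : List String :=
  ["Bar", "Position_1", "Pitch_60", "Dur_2", "Position_2", "Velocity_5", "Pitch_61"]


def Spec_recover_position_track (merged_events_per_track : List String) (out : List String) : Prop := out = recover_position_track_alt merged_events_per_track
instance (merged_events_per_track : List String) (out : List String) : Decidable (Spec_recover_position_track merged_events_per_track out) := by unfold Spec_recover_position_track; infer_instance

-- ===== CLAIM (what is proved, stated in full; the proofs are below) =====
def Claim_equal_recover_position_track : Prop := ∀ (merged_events_per_track : List String), Dom_recover_position_track merged_events_per_track → Pre_recover_position_track merged_events_per_track → Spec_recover_position_track merged_events_per_track (recover_position_track merged_events_per_track)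


-- ===== LEMMAS AND PROOFS =====

-- enumerate with a shifted start
theorem rpt_enumShift (xs : List String) (s : Int) :
    PySem.List.enumerate xs (s + 1) = (PySem.List.enumerate xs s).map (fun p => (p.1 + 1, p.2)) := by
  induction xs generalizing s with
  | nil => simp [PySem.List.enumerate_nil]
  | cons x xs ih =>
    rw [PySem.List.enumerate_cons, PySem.List.enumerate_cons, ih (s + 1)]
    simp

-- structure of pos_index on a cons
theorem rpt_posIndex_cons (x : String) (xs : List String) :
    rptPosIndex (x :: xs) =
      (if rptPos x then [(0 : Int)] else []) ++ (rptPosIndex xs).map (· + 1) := by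
  unfold rptPosIndex
  rw [PySem.List.enumerate_cons, show (0 : Int) + 1 = 0 + 1 by ring, rpt_enumShift,
    List.filter_cons, List.filter_map]
  cases h : rptPos x
  · simp [List.map_map, Function.comp_def]
  · simp [List.map_map, Function.comp_def]

theorem rpt_posIndex_ne_nil (xs : List String) : rptPosIndex xs ≠ [] := by
  unfold rptPosIndex; simp

theorem rpt_posIndex_nonneg (xs : List String) : ∀ i ∈ rptPosIndex xs, 0 ≤ i := by
  intro i hi
  unfold rptPosIndex at hi
  rcases List.mem_append.mp hi with h | h
  · obtain ⟨p, hp, rfl⟩ := List.mem_map.mp h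
    obtain ⟨k, hk, rfl⟩ := (PySem.List.mem_enumerate_iff _ _ _).mp (List.mem_of_mem_filter hp)
    simp
  · simp_all

-- the first pos index is the length of the no-Position prefix
theorem rpt_posIndex_headD (xs : List String) :
    (rptPosIndex xs).headD 0 = ((xs.takeWhile (fun e => !rptPos e)).length : Int) := by
  induction xs with
  | nil => simp [rptPosIndex, PySem.List.enumerate_nil]
  | cons x xs ih =>
    rw [rpt_posIndex_cons, List.takeWhile_cons]
    cases h : rptPos x
    · rcases hl : rptPosIndex xs with _ | ⟨a, l⟩
      · exact absurd hl (rpt_posIndex_ne_nil xs)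
      · rw [hl] at ih
        simp only [List.headD_cons] at ih
        simp [ih]
    · simp

-- slice with the first pos index = the no-Position prefix
theorem rpt_init_eq (xs : List String) :
    PySem.List.slice xs none (some ((rptPosIndex xs).headD 0)) =
      xs.takeWhile (fun e => !rptPos e) := by
  rw [rpt_posIndex_headD, PySem.List.slice_to_natCast]
  exact (List.prefix_iff_eq_take.mp (List.takeWhile_prefix _)).symm

-- shifting both slice bounds past a cons
theorem rpt_segFold_shift (x : String) (xs : List String) (st : List String × Option String)
    (a b : Int) (ha : 0 ≤ a) (hb : 0 ≤ b) :
    rptSegFold (x :: xs) st (a + 1, b + 1) = rptSegFold xs st (a, b) := by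
  have hsl : PySem.List.slice (x :: xs) (some (a + 1)) (some (b + 1)) =
      PySem.List.slice xs (some a) (some b) := by
    rw [PySem.List.slice_toNat (x :: xs) (by omega) (by omega), PySem.List.slice_toNat xs ha hb]
    have h1 : (a + 1).toNat = a.toNat + 1 := by omega
    rw [h1]
    have h2 : (b + 1).toNat - (a.toNat + 1) = b.toNat - a.toNat := by omega
    rw [h2, List.drop_succ_cons]
  simp only [rptSegFold, hsl]

-- A's outer fold only appends to the accumulator
theorem rpt_segfold_factor (xs : List String) (prs : List (Int × Int))
    (o : List String) (c : Option String) :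
    prs.foldl (rptSegFold xs) (o, c) =
      (o ++ (prs.foldl (rptSegFold xs) ([], c)).1, (prs.foldl (rptSegFold xs) ([], c)).2) := by
  induction prs generalizing o c with
  | nil => simp
  | cons pr prs ih =>
    rcases h : rptSegFold xs ([], c) pr with ⟨i1, i2⟩
    have h1 := congrArg Prod.fst h
    have h2 := congrArg Prod.snd h
    simp only at h1 h2
    have hstep : rptSegFold xs (o, c) pr = (o ++ i1, i2) := by
      rw [← h1, ← h2]; simp [rptSegFold]
    simp only [List.foldl_cons, hstep, h, ih i1 i2, ih (o ++ i1) i2, List.append_assoc]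

-- B's step appends and preserves a nonempty accumulator
theorem rpt_bstep_ne_nil (o : List String) (c : Option String) (e : String) :
    (rptBStep (o, c) e).1 ≠ [] := by
  cases hP : rptPos e <;> cases hQ : rptPit e <;>
    · simp only [rptBStep, hP, hQ]
      split_ifs <;> simp

theorem rpt_bstep_append (o0 o : List String) (c : Option String) (e : String) (h : o ≠ []) :
    rptBStep (o0 ++ o, c) e = (o0 ++ (rptBStep (o, c) e).1, (rptBStep (o, c) e).2) := by
  have hlast : (o0 ++ o).getLast? = o.getLast? := by
    rw [List.getLast?_append]
    cases h2 : o.getLast? with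
    | none => exact absurd (by simpa using h2) h
    | some a => rfl
  have hne : o0 ++ o ≠ [] := by simp [h]
  cases hP : rptPos e <;> cases hQ : rptPit e <;>
    · simp only [rptBStep, hP, hQ, hlast, ne_eq, hne, h, not_false_iff, true_and]
      split_ifs <;> simp [List.append_assoc]

theorem rpt_bfold_factor (ys : List String) (o0 o : List String) (c : Option String) (h : o ≠ []) :
    ys.foldl rptBStep (o0 ++ o, c) =
      (o0 ++ (ys.foldl rptBStep (o, c)).1, (ys.foldl rptBStep (o, c)).2) := by
  induction ys generalizing o c with
  | nil => simp
  | cons y ys ih =>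
    rcases hb : rptBStep (o, c) y with ⟨b1, b2⟩
    have hb1 : b1 ≠ [] := by
      rw [show b1 = (rptBStep (o, c) y).1 by rw [hb]]; exact rpt_bstep_ne_nil o c y
    simp only [List.foldl_cons, rpt_bstep_append o0 o c y h, hb]
    exact ih b1 b2 hb1

-- A's inner step = B's step once the accumulator is nonempty and a position is current
theorem rpt_step_eq (o : List String) (c : String) (e : String) (h : o ≠ []) :
    rptStep (o, some c) e = rptBStep (o, some c) e := by
  rcases hlast : o.getLast? with _ | last
  · exact absurd (by simpa using hlast) h
  cases hP : rptPos e <;> cases hQ : rptPit e <;>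
    · simp only [rptStep, rptBStep, hP, hQ, hlast, ne_eq, h, not_false_iff, true_and]
      split_ifs <;> simp_all

-- both steps on a pure Position event
theorem rpt_stepA_pos (c : Option String) (p : String)
    (hP : rptPos p = true) (hQ : rptPit p = false) :
    rptStep ([], c) p = ([p], some p) := by
  simp [rptStep, hP, hQ]

theorem rpt_stepB_pos (o : List String) (c : Option String) (p : String)
    (hP : rptPos p = true) (hQ : rptPit p = false) :
    rptBStep (o, c) p = (o ++ [p], some p) := by
  simp [rptBStep, hP, hQ]

theorem rpt_bstep_snd_some (o : List String) (c e : String) :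
    ∃ c', (rptBStep (o, some c) e).2 = some c' := by
  cases hP : rptPos e <;> cases hQ : rptPit e <;>
    · simp only [rptBStep, hP, hQ]
      split_ifs <;> simp

-- the two folds agree from a nonempty accumulator with a current position
theorem rpt_foldAB (zs : List String) :
    ∀ (o : List String) (c : String), o ≠ [] →
      zs.foldl rptStep (o, some c) = zs.foldl rptBStep (o, some c) := by
  induction zs with
  | nil => intro o c _; rfl
  | cons z zs ih =>
    intro o c h
    simp only [List.foldl_cons, rpt_step_eq o c z h]
    rcases hb : rptBStep (o, some c) z with ⟨b1, b2⟩
    have hb1 : b1 ≠ [] := by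
      rw [show b1 = (rptBStep (o, some c) z).1 by rw [hb]]; exact rpt_bstep_ne_nil _ _ _
    obtain ⟨c', hc'⟩ := rpt_bstep_snd_some o c z
    rw [hb] at hc'
    simp only at hc'
    rw [hc']
    exact ih b1 c' hb1

-- B on a no-Position block just copies it
theorem rpt_bfold_prefix (zs : List String) (h : ∀ e ∈ zs, rptPos e = false) :
    ∀ o0 : List String, zs.foldl rptBStep (o0, none) = (o0 ++ zs, none) := by
  induction zs with
  | nil => intro o0; simp
  | cons z zs ih =>
    intro o0
    have hz : rptPos z = false := h z (by simp)
    have hstep : rptBStep (o0, none) z = (o0 ++ [z], none) := by simp [rptBStep, hz]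
    simp only [List.foldl_cons, hstep]
    rw [ih (fun e he => h e (by simp [he])) (o0 ++ [z]), List.append_assoc]
    rfl

-- restarting B's fold on a block headed by a pure Position event forgets (o, c)
theorem rpt_bfold_restart (rest : List String) (o : List String) (c : Option String)
    (hhead : ∀ p t, rest = p :: t → rptPos p = true ∧ rptPit p = false) :
    (rest.foldl rptBStep (o, c)).1 = o ++ (rest.foldl rptBStep ([], none)).1 := by
  cases rest with
  | nil => simp
  | cons p t =>
    obtain ⟨hP, hQ⟩ := hhead p t rfl
    simp only [List.foldl_cons, rpt_stepB_pos _ _ _ hP hQ, List.nil_append]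
    rw [rpt_bfold_factor t o [p] (some p) (by simp)]

-- A's outer fold with the pos_index pairs, from an empty accumulator
def rptFa (ys : List String) (c : Option String) : List String × Option String :=
  (((rptPosIndex ys).dropLast.zip (rptPosIndex ys).tail)).foldl (rptSegFold ys) ([], c)

theorem rpt_A_eq (xs : List String) :
    recover_position_track xs =
      xs.takeWhile (fun e => !rptPos e) ++ (rptFa xs none).1 := by
  show (((rptPosIndex xs).dropLast.zip (rptPosIndex xs).tail).foldl (rptSegFold xs)
      (PySem.List.slice xs none (some ((rptPosIndex xs).headD 0)), none)).1 = _
  rw [rpt_segfold_factor, rpt_init_eq]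
  rfl

-- shifted pair folds over a cons reduce to the tail
theorem rpt_pairs_shift_fold (x : String) (ys : List String) (l : List Int)
    (hnn : ∀ i ∈ l, 0 ≤ i) (st : List String × Option String) :
    (((l.map (· + 1)).dropLast.zip (l.map (· + 1)).tail)).foldl (rptSegFold (x :: ys)) st =
      ((l.dropLast.zip l.tail)).foldl (rptSegFold ys) st := by
  rw [← List.map_dropLast, ← List.map_tail, List.zip_map, List.foldl_map]
  apply PySem.List.foldl_congr_mem
  intro acc p hp
  have hmem := List.of_mem_zip hp
  have h1 : 0 ≤ p.1 := hnn p.1 ((List.dropLast_sublist _).subset hmem.1)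
  have h2 : 0 ≤ p.2 := hnn p.2 ((List.tail_sublist _).subset hmem.2)
  show rptSegFold (x :: ys) acc (p.1 + 1, p.2 + 1) = rptSegFold ys acc (p.1, p.2)
  exact rpt_segFold_shift x ys acc p.1 p.2 h1 h2

theorem rpt_Fa_skip (x : String) (xs : List String)
    (hP : rptPos x = false) (c : Option String) :
    rptFa (x :: xs) c = rptFa xs c := by
  unfold rptFa
  rw [rpt_posIndex_cons]
  simp only [hP, Bool.false_eq_true, if_neg, List.nil_append, not_false_iff]
  exact rpt_pairs_shift_fold x xs (rptPosIndex xs) (rpt_posIndex_nonneg xs) _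

theorem rpt_Fa_cons_P (x : String) (ys : List String) (c : Option String)
    (hP : rptPos x = true) :
    (rptFa (x :: ys) c).1 =
      ((x :: ys.takeWhile (fun e => !rptPos e)).foldl rptStep ([], c)).1
        ++ (rptFa ys (((x :: ys.takeWhile (fun e => !rptPos e)).foldl rptStep ([], c)).2)).1 := by
  unfold rptFa
  rw [rpt_posIndex_cons]
  simp only [hP, if_pos]
  rcases hl : rptPosIndex ys with _ | ⟨l0, l'⟩
  · exact absurd hl (rpt_posIndex_ne_nil ys)
  have hl0 : l0 = ((ys.takeWhile (fun e => !rptPos e)).length : Int) := by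
    have := rpt_posIndex_headD ys
    rw [hl] at this
    simpa using this
  have hnn : ∀ i ∈ (l0 :: l'), 0 ≤ i := by rw [← hl]; exact rpt_posIndex_nonneg ys
  -- the first segment slice is x followed by the no-Position prefix of ys
  have hslice : PySem.List.slice (x :: ys) (some 0) (some (l0 + 1)) =
      x :: ys.takeWhile (fun e => !rptPos e) := by
    rw [PySem.List.slice_zero_start, hl0]
    have hcast : ((ys.takeWhile (fun e => !rptPos e)).length : Int) + 1 =
        (((ys.takeWhile (fun e => !rptPos e)).length + 1 : Nat) : Int) := by push_cast; ring
    rw [hcast, PySem.List.slice_to_natCast, List.take_succ_cons]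
    congr 1
    exact (List.prefix_iff_eq_take.mp (List.takeWhile_prefix _)).symm
  have hfirst : rptSegFold (x :: ys) ([], c) (0, l0 + 1) =
      ((x :: ys.takeWhile (fun e => !rptPos e)).foldl rptStep ([], c)) := by
    simp only [rptSegFold, hslice]
    exact Prod.ext (List.nil_append _) rfl
  simp only [List.map_cons, List.singleton_append, List.dropLast_cons₂, List.tail_cons,
    List.zip_cons_cons]
  rw [List.foldl_cons, hfirst]
  have hzip : (((l0 + 1) :: l'.map (· + 1)).dropLast).zip (l'.map (· + 1)) =
      (((l0 :: l').map (· + 1)).dropLast).zip (((l0 :: l').map (· + 1)).tail) := rfl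
  rw [hzip, rpt_pairs_shift_fold x ys (l0 :: l') hnn]
  have heta : ((x :: ys.takeWhile (fun e => !rptPos e)).foldl rptStep ([], c)) =
      (((x :: ys.takeWhile (fun e => !rptPos e)).foldl rptStep ([], c)).1,
        ((x :: ys.takeWhile (fun e => !rptPos e)).foldl rptStep ([], c)).2) := rfl
  rw [heta, rpt_segfold_factor]
  simp

-- main fold equality: A's segmented fold = B's flat fold on the suffix from the first Position
theorem rpt_MF (ys : List String)
    (hpre : ∀ e ∈ ys, rptPos e = true → rptPit e = false) :
    ∀ c, (rptFa ys c).1 =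
      ((ys.dropWhile (fun e => !rptPos e)).foldl rptBStep ([], none)).1 := by
  induction ys with
  | nil => intro c; simp [rptFa, rptPosIndex, PySem.List.enumerate_nil]
  | cons y ys ih =>
    intro c
    cases hP : rptPos y
    · rw [rpt_Fa_skip y ys hP c, ih (fun e he => hpre e (by simp [he])) c,
        List.dropWhile_cons]
      simp [hP]
    · have hQ : rptPit y = false := hpre y (by simp) hP
      rw [rpt_Fa_cons_P y ys c hP]
      have hAB : (y :: ys.takeWhile (fun e => !rptPos e)).foldl rptStep ([], c) =
          (y :: ys.takeWhile (fun e => !rptPos e)).foldl rptBStep ([], none) := by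
        simp only [List.foldl_cons, rpt_stepA_pos c y hP hQ,
          rpt_stepB_pos [] none y hP hQ, List.nil_append]
        exact rpt_foldAB _ [y] y (by simp)
      rw [hAB]
      have hdw : (y :: ys).dropWhile (fun e => !rptPos e) = y :: ys := by
        rw [List.dropWhile_cons]; simp [hP]
      rw [hdw]
      have hsplit : y :: ys =
          (y :: ys.takeWhile (fun e => !rptPos e)) ++ ys.dropWhile (fun e => !rptPos e) := by
        simp [List.takeWhile_append_dropWhile]
      conv_rhs => rw [hsplit, List.foldl_append]
      have hhead : ∀ p t, ys.dropWhile (fun e => !rptPos e) = p :: t →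
          rptPos p = true ∧ rptPit p = false := by
        intro p t hpt
        have hne : ys.dropWhile (fun e => !rptPos e) ≠ [] := by rw [hpt]; simp
        have h2 := List.head_dropWhile_not (l := ys) (p := fun e => !rptPos e) hne
        have h3 : (ys.dropWhile (fun e => !rptPos e)).head hne = p := by
          simp only [hpt, List.head_cons]
        rw [h3] at h2
        have hPp : rptPos p = true := by simpa using h2
        have hmem : p ∈ ys := (List.dropWhile_sublist _).subset (by rw [hpt]; simp)
        exact ⟨hPp, hpre p (by simp [hmem]) hPp⟩
      have heta : ((y :: ys.takeWhile (fun e => !rptPos e)).foldl rptBStep ([], none)) =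
          (((y :: ys.takeWhile (fun e => !rptPos e)).foldl rptBStep ([], none)).1,
            ((y :: ys.takeWhile (fun e => !rptPos e)).foldl rptBStep ([], none)).2) := rfl
      conv_rhs => rw [heta]
      rw [rpt_bfold_restart _ _ _ hhead]
      rw [ih (fun e he => hpre e (by simp [he]))
        (((y :: ys.takeWhile (fun e => !rptPos e)).foldl rptBStep ([], none)).2)]

-- ===== VERDICT (by name: the statement is the Claim_ definition above) =====
theorem recover_position_track_spec : Claim_equal_recover_position_track := by
  intro xs _ hpre
  unfold Spec_recover_position_track
  have hpre' : ∀ e ∈ xs, rptPos e = true → rptPit e = false := by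
    intro e he hP
    have := List.all_eq_true.mp hpre e he
    simpa [hP] using this
  rw [rpt_A_eq, rpt_MF xs hpre' none]
  show _ = (xs.foldl rptBStep ([], none)).1
  have htake : ∀ e ∈ xs.takeWhile (fun e => !rptPos e), rptPos e = false :=
    fun e he => by simpa using List.mem_takeWhile_imp he
  have hhead : ∀ p t, xs.dropWhile (fun e => !rptPos e) = p :: t →
      rptPos p = true ∧ rptPit p = false := by
    intro p t hpt
    have hne : xs.dropWhile (fun e => !rptPos e) ≠ [] := by rw [hpt]; simp
    have h2 := List.head_dropWhile_not (l := xs) (p := fun e => !rptPos e) hne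
    have h3 : (xs.dropWhile (fun e => !rptPos e)).head hne = p := by
      simp only [hpt, List.head_cons]
    rw [h3] at h2
    have hPp : rptPos p = true := by simpa using h2
    have hmem : p ∈ xs := (List.dropWhile_sublist _).subset (by rw [hpt]; simp)
    exact ⟨hPp, hpre' p hmem hPp⟩
  conv_rhs =>
    rw [← List.takeWhile_append_dropWhile (p := fun e => !rptPos e) (l := xs),
      List.foldl_append,
      rpt_bfold_prefix (xs.takeWhile (fun e => !rptPos e)) htake ([])]
  rw [rpt_bfold_restart (xs.dropWhile (fun e => !rptPos e))
    ([] ++ xs.takeWhile (fun e => !rptPos e)) none hhead]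
  simp
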